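-- pv_equiv track=rewrite | github.com/Kishan-kr/EOD-milestone | scrape_and_store.py | extract_required_rates
-- ===== SOURCE A (Python) =====
-- def extract_required_rates(interest_rate_data):
--     if not interest_rate_data:
--         return None
--
--     # Extracting Central Bank Rate
--     central_bank_rates = interest_rate_data.get("central_bank_rates", [])
--     central_bank_rate = central_bank_rates[0] if central_bank_rates else None
--
--     # Extracting Non-Central Bank Rates
--     non_central_bank_rates = interest_rate_data.get("non_central_bank_rates", [])
--
--     usd_libor = next(
--         (
--             item
--             for item in non_central_bank_rates
--             if item["name"] == "USD LIBOR - 1 month"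
--         ),
--         None,
--     )
--     eur_libor = next(
--         (
--             item
--             for item in non_central_bank_rates
--             if item["name"] == "Euribor - 1 month"
--         ),
--         None,
--     )  # Adjust this if the name is different
--     sofr = next(
--         (item for item in non_central_bank_rates if item["name"] == "SOFR"), None
--     )
--
--     return {
--         "central_bank_rate": central_bank_rate,
--         "usd_libor": usd_libor,
--         "eur_libor": eur_libor,
--         "sofr": sofr,
--     }
-- ===== SOURCE B (Python) =====
-- def extract_required_rates(interest_rate_data):
--     if not interest_rate_data:
--         return None
--
--     central_bank_rates = interest_rate_data.get("central_bank_rates", [])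
--
--     by_name = {}
--     for item in interest_rate_data.get("non_central_bank_rates", []):
--         by_name.setdefault(item["name"], item)
--
--     return {
--         "central_bank_rate": central_bank_rates[0] if central_bank_rates else None,
--         "usd_libor": by_name.get("USD LIBOR - 1 month"),
--         "eur_libor": by_name.get("Euribor - 1 month"),
--         "sofr": by_name.get("SOFR"),
--     }
-- ===== Notes on version B (the rewrite author's own statement) =====
-- stated objective: simpler
-- what changed: Replaces A's three independent lazy scans of non_central_bank_rates (one next(...) per rate name) with a single pass that builds a first-occurrence-wins dict keyed by item['name'], from which the three rates are looked up.
import Mathlib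
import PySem

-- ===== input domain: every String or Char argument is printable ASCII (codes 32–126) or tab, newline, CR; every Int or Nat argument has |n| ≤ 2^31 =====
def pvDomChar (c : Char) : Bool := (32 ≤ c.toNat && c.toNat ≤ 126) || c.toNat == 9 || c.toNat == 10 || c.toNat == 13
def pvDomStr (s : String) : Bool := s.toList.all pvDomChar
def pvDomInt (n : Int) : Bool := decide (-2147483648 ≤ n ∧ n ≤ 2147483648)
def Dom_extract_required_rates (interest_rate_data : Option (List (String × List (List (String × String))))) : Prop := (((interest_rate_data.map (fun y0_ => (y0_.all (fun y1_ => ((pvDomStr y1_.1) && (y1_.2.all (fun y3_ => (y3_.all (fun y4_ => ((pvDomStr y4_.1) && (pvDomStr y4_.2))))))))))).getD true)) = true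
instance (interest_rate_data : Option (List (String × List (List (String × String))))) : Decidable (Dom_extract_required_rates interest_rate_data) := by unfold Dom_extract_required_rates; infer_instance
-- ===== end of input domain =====

-- B replaces A's three independent next(...) scans by one pass building a first-wins
-- dict keyed by item["name"] and three lookups; same return value on Pre_.

-- item["name"]; the KeyError case (no "name" key) is excluded by Pre_, the getD "" there is never reached inside Pre_
def pvItemName (item : List (String × String)) : String :=
  ((PySem.Dict.ofList item).get? "name").getD ""

-- ===== PORT A =====
-- next((item for item in items if item["name"] == nm), None)
def pvNextMatch (nm : String) : List (List (String × String)) → Option (List (String × String))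
  | [] => none
  | item :: rest => if pvItemName item == nm then some item else pvNextMatch nm rest

def extract_required_rates (interest_rate_data : Option (List (String × List (List (String × String))))) : Option (List (String × Option (List (String × String)))) :=
  match interest_rate_data with
  | none => none
  | some d =>
    if d = [] then none
    else
      let central_bank_rates := (PySem.Dict.ofList d).getD "central_bank_rates" []
      let central_bank_rate := central_bank_rates.head?
      let non_central_bank_rates := (PySem.Dict.ofList d).getD "non_central_bank_rates" []
      let usd_libor := pvNextMatch "USD LIBOR - 1 month" non_central_bank_rates
      let eur_libor := pvNextMatch "Euribor - 1 month" non_central_bank_rates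
      let sofr := pvNextMatch "SOFR" non_central_bank_rates
      some [("central_bank_rate", central_bank_rate), ("usd_libor", usd_libor),
            ("eur_libor", eur_libor), ("sofr", sofr)]

-- ===== PORT B =====
def extract_required_rates_alt (interest_rate_data : Option (List (String × List (List (String × String))))) : Option (List (String × Option (List (String × String)))) :=
  match interest_rate_data with
  | none => none
  | some d =>
    if d = [] then none
    else
      let central_bank_rates := (PySem.Dict.ofList d).getD "central_bank_rates" []
      let by_name := ((PySem.Dict.ofList d).getD "non_central_bank_rates" []).foldl
        (fun acc item => acc.setdefault (pvItemName item) item) PySem.Dict.empty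
      some [("central_bank_rate", central_bank_rates.head?),
            ("usd_libor", by_name.get? "USD LIBOR - 1 month"),
            ("eur_libor", by_name.get? "Euribor - 1 month"),
            ("sofr", by_name.get? "SOFR")]

-- ===== PRECONDITION & SPEC =====
-- Pre_ excludes inputs where some item of non_central_bank_rates lacks a "name" key:
-- there Python A either raises KeyError or (if all three matches occur before the bad
-- item) returns while B raises KeyError during its single build pass.
def Pre_extract_required_rates (interest_rate_data : Option (List (String × List (List (String × String))))) : Prop :=
  (((PySem.Dict.ofList (interest_rate_data.getD [])).getD "non_central_bank_rates" []).all
      (fun item => ((PySem.Dict.ofList item).get? "name").isSome)) = true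
instance (interest_rate_data : Option (List (String × List (List (String × String))))) : Decidable (Pre_extract_required_rates interest_rate_data) := by unfold Pre_extract_required_rates; infer_instance

def pvWitness_extract_required_rates : (Option (List (String × List (List (String × String))))) :=
  some [("central_bank_rates", [[("rate_pct", "5.50")]]),
        ("non_central_bank_rates", [[("name", "SOFR"), ("rate_pct", "5.31")]])]

def Spec_extract_required_rates (interest_rate_data : Option (List (String × List (List (String × String))))) (out : Option (List (String × Option (List (String × String))))) : Prop := out = extract_required_rates_alt interest_rate_data
instance (interest_rate_data : Option (List (String × List (List (String × String))))) (out : Option (List (String × Option (List (String × String))))) : Decidable (Spec_extract_required_rates interest_rate_data out) := by unfold Spec_extract_required_rates; infer_instance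

-- ===== CLAIM (what is proved, stated in full; the proofs are below) =====
def Claim_equal_extract_required_rates : Prop := ∀ (interest_rate_data : Option (List (String × List (List (String × String))))), Dom_extract_required_rates interest_rate_data → Pre_extract_required_rates interest_rate_data → Spec_extract_required_rates interest_rate_data (extract_required_rates interest_rate_data)

-- ===== LEMMAS AND PROOFS =====

theorem get?_setdefault_of_ne {κ ν : Type} [BEq κ] [LawfulBEq κ]
    (d : PySem.Dict κ ν) (k k' : κ) (v : ν) (h : k' ≠ k) :
    (d.setdefault k v).get? k' = d.get? k' := by
  by_cases hc : d.contains k = true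
  · rw [PySem.Dict.setdefault_of_contains (h := hc)]
  · rw [PySem.Dict.setdefault_of_not_contains (h := by simpa using hc),
        PySem.Dict.get?_insert_of_ne d v h]

theorem get?_build_eq (items : List (List (String × String)))
    (acc : PySem.Dict String (List (String × String))) (nm : String) :
    (items.foldl (fun acc item => acc.setdefault (pvItemName item) item) acc).get? nm
      = (acc.get? nm).or (pvNextMatch nm items) := by
  induction items generalizing acc with
  | nil => cases h : acc.get? nm <;> simp [pvNextMatch, h, Option.or]
  | cons item rest ih =>
    rw [List.foldl_cons, ih]
    by_cases h : pvItemName item = nm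
    · subst h
      rw [PySem.Dict.get?_setdefault_self]
      cases hg : acc.get? (pvItemName item) <;>
        simp [pvNextMatch, Option.or]
    · rw [get?_setdefault_of_ne acc (pvItemName item) nm item (fun he => h he.symm)]
      simp [pvNextMatch, h]

theorem extract_required_rates_spec : Claim_equal_extract_required_rates := by
  intro ird _ _
  unfold Spec_extract_required_rates extract_required_rates extract_required_rates_alt
  cases ird with
  | none => rfl
  | some d =>
    by_cases hd : d = []
    · simp [hd]
    · simp only [hd, if_false]
      have h := fun nm => get?_build_eq ((PySem.Dict.ofList d).getD "non_central_bank_rates" []) PySem.Dict.empty nm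
      simp only [PySem.Dict.get?_empty, Option.or] at h
      simp [h]
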